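-- pv_equiv track=rewrite | github.com/ayushrajani07/G6_ | src/storage/csv_sink.py | _overview_compute_masks
-- ===== SOURCE A (Python) =====
-- def _overview_compute_masks(collected_keys: list[str], expected_keys: list[str] | None) -> tuple[int,int,int,int,int]:
--     """Compute bit masks and counts for expiry coverage summary.
--
--     Returns (expected_mask, collected_mask, missing_mask, expiries_expected, expiries_collected)."""
--     expiry_bit_map = {'this_week':1,'next_week':2,'this_month':4,'next_month':8}
--     collected_mask = 0
--     for k in collected_keys:
--         collected_mask |= expiry_bit_map.get(k,0)
--     if expected_keys is not None and expected_keys: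
--         expected_mask = 0
--         for k in expected_keys:
--             expected_mask |= expiry_bit_map.get(k,0)
--         expiries_expected = len(expected_keys)
--     else:
--         expected_mask = collected_mask
--         expiries_expected = len(collected_keys)
--     missing_mask = expected_mask & (~collected_mask)
--     return expected_mask, collected_mask, missing_mask, expiries_expected, len(collected_keys)
-- ===== SOURCE B (Python) =====
-- def _overview_compute_masks(collected_keys, expected_keys):
--     """Compute bit masks and counts for expiry coverage summary.
--
--     Returns (expected_mask, collected_mask, missing_mask, expiries_expected, expiries_collected)."""
--     BITS = (('this_week', 1), ('next_week', 2), ('this_month', 4), ('next_month', 8))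
--     cs = set(collected_keys)
--     collected_mask = sum(b for n, b in BITS if n in cs)
--     if expected_keys:
--         es = set(expected_keys)
--         expected_mask = sum(b for n, b in BITS if n in es)
--         # bits are disjoint powers of two, so the missing mask is the sum of
--         # bits expected but not collected (no bitwise ops needed)
--         missing_mask = sum(b for n, b in BITS if n in es and n not in cs)
--         expiries_expected = len(expected_keys)
--     else:
--         expected_mask, missing_mask, expiries_expected = collected_mask, 0, len(collected_keys)
--     return expected_mask, collected_mask, missing_mask, expiries_expected, len(collected_keys)
-- ===== Notes on version B (the rewrite author's own statement) =====
-- stated objective: alternative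
-- what changed: B builds a set from each key list once and computes each mask as a sum of the four fixed category bits filtered by set membership, and derives missing_mask directly as the sum of bits expected-but-not-collected (the bits being disjoint powers of two), replacing A's per-key dict-lookup OR loops and the bitwise AND-NOT.
import Mathlib
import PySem

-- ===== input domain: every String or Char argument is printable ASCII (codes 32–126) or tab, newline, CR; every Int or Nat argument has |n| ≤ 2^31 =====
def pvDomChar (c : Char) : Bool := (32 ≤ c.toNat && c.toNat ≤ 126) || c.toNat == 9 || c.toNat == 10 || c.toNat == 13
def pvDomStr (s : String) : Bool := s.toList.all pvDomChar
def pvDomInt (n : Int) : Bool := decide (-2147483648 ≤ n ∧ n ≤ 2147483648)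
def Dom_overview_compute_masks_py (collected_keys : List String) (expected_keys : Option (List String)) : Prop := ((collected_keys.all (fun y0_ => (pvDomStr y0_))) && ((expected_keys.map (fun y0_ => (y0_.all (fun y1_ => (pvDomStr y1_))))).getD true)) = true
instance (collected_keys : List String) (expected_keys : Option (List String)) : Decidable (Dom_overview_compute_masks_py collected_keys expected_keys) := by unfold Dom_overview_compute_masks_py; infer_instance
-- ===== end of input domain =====

-- B computes each mask as a sum of the four fixed category bits filtered by set membership,
-- and derives missing_mask as the sum of bits expected-but-not-collected (disjoint powers of two),
-- replacing A's per-key dict-lookup OR loops and the bitwise AND-NOT (alternative; lengths stay those of the raw lists).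

-- ===== PORT A =====
def overview_compute_masks_py (collected_keys : List String) (expected_keys : Option (List String)) : Int × Int × Int × Int × Int :=
  let expiry_bit_map : PySem.Dict String Int :=
    PySem.Dict.ofList [("this_week", 1), ("next_week", 2), ("this_month", 4), ("next_month", 8)]
  let collected_mask : Int := collected_keys.foldl (fun m k => PySem.Int.bor m (expiry_bit_map.getD k 0)) 0
  match expected_keys with
  | some eks =>
    if eks ≠ [] then
      let expected_mask : Int := eks.foldl (fun m k => PySem.Int.bor m (expiry_bit_map.getD k 0)) 0
      (expected_mask, collected_mask, PySem.Int.band expected_mask (Int.not collected_mask), (eks.length : Int), (collected_keys.length : Int))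
    else
      (collected_mask, collected_mask, PySem.Int.band collected_mask (Int.not collected_mask), (collected_keys.length : Int), (collected_keys.length : Int))
  | none =>
      (collected_mask, collected_mask, PySem.Int.band collected_mask (Int.not collected_mask), (collected_keys.length : Int), (collected_keys.length : Int))

-- ===== PORT B =====
-- the fixed tuple BITS of Source B
def pvBits : List (String × Int) := [("this_week", 1), ("next_week", 2), ("this_month", 4), ("next_month", 8)]

def overview_compute_masks_py_alt (collected_keys : List String) (expected_keys : Option (List String)) : Int × Int × Int × Int × Int :=
  let cs : PySem.Set String := PySem.Set.ofList collected_keys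
  let collected_mask : Int := ((pvBits.filter (fun p => PySem.Set.contains cs p.1)).map Prod.snd).sum
  match expected_keys with
  | some eks =>
    if eks ≠ [] then
      let es : PySem.Set String := PySem.Set.ofList eks
      let expected_mask : Int := ((pvBits.filter (fun p => PySem.Set.contains es p.1)).map Prod.snd).sum
      let missing_mask : Int := ((pvBits.filter (fun p => PySem.Set.contains es p.1 && !PySem.Set.contains cs p.1)).map Prod.snd).sum
      (expected_mask, collected_mask, missing_mask, (eks.length : Int), (collected_keys.length : Int))
    else
      (collected_mask, collected_mask, 0, (collected_keys.length : Int), (collected_keys.length : Int))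
  | none =>
      (collected_mask, collected_mask, 0, (collected_keys.length : Int), (collected_keys.length : Int))

-- ===== PRECONDITION & SPEC =====
def Spec_overview_compute_masks_py (collected_keys : List String) (expected_keys : Option (List String)) (out : Int × Int × Int × Int × Int) : Prop := out = overview_compute_masks_py_alt collected_keys expected_keys
instance (collected_keys : List String) (expected_keys : Option (List String)) (out : Int × Int × Int × Int × Int) : Decidable (Spec_overview_compute_masks_py collected_keys expected_keys out) := by unfold Spec_overview_compute_masks_py; infer_instance

-- ===== CLAIM (what is proved, stated in full; the proofs are below) =====
def Claim_equal_overview_compute_masks_py : Prop := ∀ (collected_keys : List String) (expected_keys : Option (List String)), Dom_overview_compute_masks_py collected_keys expected_keys → Spec_overview_compute_masks_py collected_keys expected_keys (overview_compute_masks_py collected_keys expected_keys)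

-- ===== LEMMAS AND PROOFS =====

-- nested OR of the four category bits, one flag per category
def pvG (b1 b2 b3 b4 : Bool) : Int :=
  PySem.Int.bor (PySem.Int.bor (PySem.Int.bor (if b1 then (1:Int) else 0) (if b2 then 2 else 0)) (if b3 then 4 else 0)) (if b4 then 8 else 0)

theorem pvG_or1 (b1 b2 b3 b4 : Bool) : PySem.Int.bor (pvG b1 b2 b3 b4) 1 = pvG true b2 b3 b4 := by
  rcases b1 <;> rcases b2 <;> rcases b3 <;> rcases b4 <;> decide

theorem pvG_or2 (b1 b2 b3 b4 : Bool) : PySem.Int.bor (pvG b1 b2 b3 b4) 2 = pvG b1 true b3 b4 := by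
  rcases b1 <;> rcases b2 <;> rcases b3 <;> rcases b4 <;> decide

theorem pvG_or4 (b1 b2 b3 b4 : Bool) : PySem.Int.bor (pvG b1 b2 b3 b4) 4 = pvG b1 b2 true b4 := by
  rcases b1 <;> rcases b2 <;> rcases b3 <;> rcases b4 <;> decide

theorem pvG_or8 (b1 b2 b3 b4 : Bool) : PySem.Int.bor (pvG b1 b2 b3 b4) 8 = pvG b1 b2 b3 true := by
  rcases b1 <;> rcases b2 <;> rcases b3 <;> rcases b4 <;> decide

theorem pvG_or0 (b1 b2 b3 b4 : Bool) : PySem.Int.bor (pvG b1 b2 b3 b4) 0 = pvG b1 b2 b3 b4 := by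
  rcases b1 <;> rcases b2 <;> rcases b3 <;> rcases b4 <;> decide

-- A's fold over the key list, with accumulator expressed through pvG
theorem maskA_eq (ks : List String) : ∀ (b1 b2 b3 b4 : Bool),
    ks.foldl (fun m k => PySem.Int.bor m ((PySem.Dict.ofList [("this_week", (1:Int)), ("next_week", 2), ("this_month", 4), ("next_month", 8)]).getD k 0)) (pvG b1 b2 b3 b4)
    = pvG (b1 || ks.contains "this_week") (b2 || ks.contains "next_week") (b3 || ks.contains "this_month") (b4 || ks.contains "next_month") := by
  induction ks with
  | nil => intro b1 b2 b3 b4; simp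
  | cons k ks ih =>
    intro b1 b2 b3 b4
    by_cases h1 : k = "this_week"
    · subst h1
      simp only [List.foldl_cons]
      rw [show (PySem.Dict.ofList [("this_week", (1:Int)), ("next_week", 2), ("this_month", 4), ("next_month", 8)]).getD "this_week" 0 = 1 from by decide,
        pvG_or1, ih]
      simp
    · by_cases h2 : k = "next_week"
      · subst h2
        simp only [List.foldl_cons]
        rw [show (PySem.Dict.ofList [("this_week", (1:Int)), ("next_week", 2), ("this_month", 4), ("next_month", 8)]).getD "next_week" 0 = 2 from by decide,
          pvG_or2, ih]
        simp
      · by_cases h3 : k = "this_month"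
        · subst h3
          simp only [List.foldl_cons]
          rw [show (PySem.Dict.ofList [("this_week", (1:Int)), ("next_week", 2), ("this_month", 4), ("next_month", 8)]).getD "this_month" 0 = 4 from by decide,
            pvG_or4, ih]
          simp
        · by_cases h4 : k = "next_month"
          · subst h4
            simp only [List.foldl_cons]
            rw [show (PySem.Dict.ofList [("this_week", (1:Int)), ("next_week", 2), ("this_month", 4), ("next_month", 8)]).getD "next_month" 0 = 8 from by decide,
              pvG_or8, ih]
            simp
          · simp only [List.foldl_cons]
            rw [show (PySem.Dict.ofList [("this_week", (1:Int)), ("next_week", 2), ("this_month", 4), ("next_month", 8)]).getD k 0 = 0 from by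
                rw [show (PySem.Dict.ofList [("this_week", (1:Int)), ("next_week", 2), ("this_month", 4), ("next_month", 8)]) = PySem.Dict.mk [("this_week", (1:Int)), ("next_week", 2), ("this_month", 4), ("next_month", 8)] from by decide]
                simp [PySem.Dict.getD, PySem.Dict.get?, Ne.symm h1, Ne.symm h2, Ne.symm h3, Ne.symm h4],
              pvG_or0, ih]
            simp [Ne.symm h1, Ne.symm h2, Ne.symm h3, Ne.symm h4]

theorem maskA_zero (ks : List String) :
    ks.foldl (fun m k => PySem.Int.bor m ((PySem.Dict.ofList [("this_week", (1:Int)), ("next_week", 2), ("this_month", 4), ("next_month", 8)]).getD k 0)) 0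
    = pvG (ks.contains "this_week") (ks.contains "next_week") (ks.contains "this_month") (ks.contains "next_month") := by
  have hA := maskA_eq ks false false false false
  rw [show pvG false false false false = (0:Int) from by decide] at hA
  simpa using hA

theorem pvG_decide_sum (ks : List String) :
    (List.map Prod.snd (List.filter (fun p => decide (p.1 ∈ ks)) pvBits)).sum
    = pvG (decide ("this_week" ∈ ks)) (decide ("next_week" ∈ ks)) (decide ("this_month" ∈ ks)) (decide ("next_month" ∈ ks)) := by
  rcases e1 : decide ("this_week" ∈ ks) <;> rcases e2 : decide ("next_week" ∈ ks) <;>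
    rcases e3 : decide ("this_month" ∈ ks) <;> rcases e4 : decide ("next_month" ∈ ks) <;>
    simp only [pvBits, List.filter_cons, List.filter_nil, e1, e2, e3, e4] <;> decide

theorem pvG_decide_missing (es cs : List String) :
    (List.map Prod.snd (List.filter (fun p => decide (p.1 ∈ es) && !decide (p.1 ∈ cs)) pvBits)).sum
    = PySem.Int.band
      (pvG (decide ("this_week" ∈ es)) (decide ("next_week" ∈ es)) (decide ("this_month" ∈ es)) (decide ("next_month" ∈ es)))
      (Int.not (pvG (decide ("this_week" ∈ cs)) (decide ("next_week" ∈ cs)) (decide ("this_month" ∈ cs)) (decide ("next_month" ∈ cs)))) := by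
  rcases e1 : decide ("this_week" ∈ es) <;> rcases e2 : decide ("next_week" ∈ es) <;>
    rcases e3 : decide ("this_month" ∈ es) <;> rcases e4 : decide ("next_month" ∈ es) <;>
    rcases c1 : decide ("this_week" ∈ cs) <;> rcases c2 : decide ("next_week" ∈ cs) <;>
    rcases c3 : decide ("this_month" ∈ cs) <;> rcases c4 : decide ("next_month" ∈ cs) <;>
    simp only [pvBits, List.filter_cons, List.filter_nil, e1, e2, e3, e4, c1, c2, c3, c4] <;> decide

theorem band_not_self (b1 b2 b3 b4 : Bool) :
    PySem.Int.band (pvG b1 b2 b3 b4) (Int.not (pvG b1 b2 b3 b4)) = 0 := by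
  rcases b1 <;> rcases b2 <;> rcases b3 <;> rcases b4 <;> decide

-- ===== VERDICT (by name: the statement is the Claim_ definition above) =====
theorem overview_compute_masks_py_spec : Claim_equal_overview_compute_masks_py := by
  intro ck ek _
  unfold Spec_overview_compute_masks_py overview_compute_masks_py overview_compute_masks_py_alt
  match ek with
  | none => simp [maskA_zero, band_not_self, pvG_decide_sum]
  | some eks =>
    by_cases h : eks = [] <;>
      simp [h, maskA_zero, band_not_self, pvG_decide_sum, pvG_decide_missing]
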